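-- pv_equiv track=rewrite | github.com/sta4888/y_lab_lesson1_hw | main.py | get_list_of_words_banana
-- ===== SOURCE A (Python) =====
-- def get_list_of_words_banana(s: str, word: str) -> list:
--     ret = []
--
--     if word == '':
--         ret.append(''.rjust(len(s), '-'))
--         return ret
--
--     for si in range(len(s)):
--         if word[0] == s[si]:
--             left_s = ''.rjust(si, '-') + s[si]
--             if s[si + 1:] == '' and word[1:] == '':
--                 ret.append(left_s)
--             else:
--                 right_s_list = get_list_of_words_banana(s[si + 1:], word[1:])
--                 for right_s in right_s_list:
--                     ret.append(left_s + right_s)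
--     return ret
-- ===== SOURCE B (Python) =====
-- def get_list_of_words_banana(s: str, word: str) -> list:
--     n = len(s)
--     # layered breadth-first extension of increasing index tuples (lexicographic order)
--     paths = [()]
--     for ch in word:
--         paths = [p + (i,)
--                  for p in paths
--                  for i in range(n)
--                  if (not p or i > p[-1]) and s[i] == ch]
--     res = []
--     for p in paths:
--         mask = ['-'] * n
--         for i in p:
--             mask[i] = s[i]
--         res.append(''.join(mask))
--     return res
-- ===== Notes on version B (the rewrite author's own statement) =====
-- stated objective: alternative
-- what changed: Replaced A's recursive splice-and-concatenate search over string suffixes by an iterative layered (BFS) enumeration of increasing index tuples followed by a mask-building pass.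
import Mathlib
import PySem

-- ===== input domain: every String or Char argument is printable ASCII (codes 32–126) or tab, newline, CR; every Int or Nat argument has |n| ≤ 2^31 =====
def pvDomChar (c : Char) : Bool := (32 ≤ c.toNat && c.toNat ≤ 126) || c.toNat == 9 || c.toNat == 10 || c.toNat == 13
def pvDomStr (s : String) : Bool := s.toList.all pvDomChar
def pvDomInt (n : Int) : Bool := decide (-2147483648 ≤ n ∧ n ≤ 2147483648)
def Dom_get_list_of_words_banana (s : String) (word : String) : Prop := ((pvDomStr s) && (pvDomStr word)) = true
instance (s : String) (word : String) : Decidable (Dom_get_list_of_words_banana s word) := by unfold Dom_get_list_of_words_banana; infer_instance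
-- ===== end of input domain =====

-- B replaces A's recursive string-splicing search by an iterative layered enumeration of
-- increasing index tuples followed by mask building (objective: alternative algorithm, same cost).

-- ===== PORT A =====
-- A's recursion, over the strings as character lists; `s.getD si ' '` is s[si] with si < len(s)
-- (guaranteed by range), `s.drop (si+1)` is s[si+1:], `List.replicate k '-'` is ''.rjust(k,'-').
def goA : List Char → List Char → List (List Char)
  | s, [] => [List.replicate s.length '-']
  | s, c :: ws =>
    (List.range s.length).flatMap (fun si =>
      if c = s.getD si ' ' then
        let left := List.replicate si '-' ++ [s.getD si ' ']
        if s.drop (si + 1) = [] ∧ ws = [] then [left]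
        else (goA (s.drop (si + 1)) ws).map (fun r => left ++ r)
      else [])

def get_list_of_words_banana (s : String) (word : String) : List String :=
  (goA s.toList word.toList).map (fun l => String.ofList l)

-- ===== PORT B =====
-- one layer extension: all ways to append one more index i (> last of p, s[i] = c) to path p
def extB (s : List Char) (c : Char) (p : List Nat) : List (List Nat) :=
  ((List.range s.length).filter
      (fun i => p.getLast?.all (fun j => decide (j < i)) && (s.getD i ' ' == c))).map
    (fun i => p ++ [i])

def goB (s : List Char) (w : List Char) : List (List Nat) :=
  w.foldl (fun paths c => paths.flatMap (extB s c)) [[]]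

-- mask = ['-']*n with mask[i] = s[i] for i in p
def maskB (s : List Char) (p : List Nat) : List Char :=
  p.foldl (fun m i => m.set i (s.getD i ' ')) (List.replicate s.length '-')

def get_list_of_words_banana_alt (s : String) (word : String) : List String :=
  (goB s.toList word.toList).map (fun p => String.ofList (maskB s.toList p))

-- ===== PRECONDITION & SPEC =====
def Spec_get_list_of_words_banana (s : String) (word : String) (out : List String) : Prop := out = get_list_of_words_banana_alt s word
instance (s : String) (word : String) (out : List String) : Decidable (Spec_get_list_of_words_banana s word out) := by unfold Spec_get_list_of_words_banana; infer_instance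

-- ===== CLAIM (what is proved, stated in full; the proofs are below) =====
def Claim_equal_get_list_of_words_banana : Prop := ∀ (s : String) (word : String), Dom_get_list_of_words_banana s word → Spec_get_list_of_words_banana s word (get_list_of_words_banana s word)

-- ===== LEMMAS AND PROOFS =====

-- the common intermediate: increasing index tuples of s matching w, indices ≥ lo, in lex order
def F (s : List Char) (lo : Nat) : List Char → List (List Nat)
  | [] => [[]]
  | c :: ws =>
    (List.range s.length).flatMap (fun i =>
      if lo ≤ i ∧ s.getD i ' ' = c then (F s (i + 1) ws).map (fun q => i :: q) else [])

def loB (p : List Nat) : Nat := match p.getLast? with | none => 0 | some j => j + 1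

theorem filter_flatMap_if {α β : Type} (l : List α) (f : α → Bool) (g : α → List β) :
    (l.filter f).flatMap g = l.flatMap (fun a => if f a then g a else []) := by
  induction l with
  | nil => rfl
  | cons a l ih => by_cases h : f a <;> simp [h, ih]

theorem foldl_step_nil (s : List Char) (w : List Char) :
    w.foldl (fun paths c => paths.flatMap (extB s c)) [] = [] := by
  induction w with
  | nil => rfl
  | cons c ws ih => simpa using ih

theorem foldl_step_append (s : List Char) (w : List Char) (P Q : List (List Nat)) :
    w.foldl (fun paths c => paths.flatMap (extB s c)) (P ++ Q)
      = w.foldl (fun paths c => paths.flatMap (extB s c)) P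
        ++ w.foldl (fun paths c => paths.flatMap (extB s c)) Q := by
  induction w generalizing P Q with
  | nil => rfl
  | cons c ws ih => simp [List.flatMap_append, ih]

theorem foldl_step_flat (s : List Char) (w : List Char) (P : List (List Nat)) :
    w.foldl (fun paths c => paths.flatMap (extB s c)) P
      = P.flatMap (fun p => w.foldl (fun paths c => paths.flatMap (extB s c)) [p]) := by
  induction P with
  | nil => simpa using foldl_step_nil s w
  | cons p P ih =>
    have : p :: P = [p] ++ P := rfl
    rw [this, foldl_step_append, ih]; rfl

theorem extB_cond (p : List Nat) (s : List Char) (c : Char) (i : Nat) :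
    (p.getLast?.all (fun j => decide (j < i)) && (s.getD i ' ' == c))
      = decide (loB p ≤ i ∧ s.getD i ' ' = c) := by
  cases h : p.getLast? <;> simp [loB, h] <;> rw [Bool.beq_eq_decide_eq]

theorem loB_concat (p : List Nat) (i : Nat) : loB (p ++ [i]) = i + 1 := by
  simp [loB]

theorem foldl_step_singleton (s : List Char) (w : List Char) (p : List Nat) :
    w.foldl (fun paths c => paths.flatMap (extB s c)) [p]
      = (F s (loB p) w).map (fun q => p ++ q) := by
  induction w generalizing p with
  | nil => simp [F]
  | cons c ws ih =>
    have hstep : List.foldl (fun paths c => paths.flatMap (extB s c)) [p] (c :: ws)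
        = ws.foldl (fun paths c => paths.flatMap (extB s c)) (extB s c p) := by
      simp
    rw [hstep, foldl_step_flat, extB, List.flatMap_map, filter_flatMap_if]
    show _ = (F s (loB p) (c :: ws)).map (fun q => p ++ q)
    simp only [F, List.map_flatMap]
    refine List.flatMap_congr (fun i _ => ?_)
    rw [extB_cond]
    simp only [decide_eq_true_eq]
    split_ifs with hc
    · rw [ih, loB_concat, List.map_map]
      refine List.map_congr_left (fun q _ => ?_)
      simp
    · rfl

-- B equals F
theorem goB_eq_F (s : List Char) (w : List Char) : goB s w = F s 0 w := by
  have h := foldl_step_singleton s w []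
  simpa [goB, loB] using h

-- shifting F by one character
theorem F_shift1 (s : List Char) (a : Char) (w : List Char) (k : Nat) :
    F (a :: s) (k + 1) w = (F s k w).map (List.map (fun i => i + 1)) := by
  induction w generalizing k with
  | nil => simp [F]
  | cons c ws ih =>
    simp only [F, List.length_cons, List.range_succ_eq_map, List.flatMap_cons,
      List.flatMap_map, List.map_flatMap]
    have h0 : ¬ (k + 1 ≤ 0 ∧ (a :: s).getD 0 ' ' = c) := by
      rintro ⟨h, -⟩; omega
    rw [if_neg h0, List.nil_append]
    refine List.flatMap_congr (fun j _ => ?_)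
    by_cases hc : k ≤ j ∧ s.getD j ' ' = c
    · have hc' : k + 1 ≤ Nat.succ j ∧ (a :: s).getD (Nat.succ j) ' ' = c := by
        constructor
        · omega
        · simpa using hc.2
      rw [if_pos hc', if_pos hc]
      have : Nat.succ j + 1 = (j + 1) + 1 := rfl
      rw [this, ih]
      simp [List.map_map, Function.comp_def]
    · have hc' : ¬ (k + 1 ≤ Nat.succ j ∧ (a :: s).getD (Nat.succ j) ' ' = c) := by
        rintro ⟨h1, h2⟩
        exact hc ⟨by omega, by simpa using h2⟩
      rw [if_neg hc', if_neg hc]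
      simp

theorem F_shift (s : List Char) (k : Nat) (w : List Char) :
    F s k w = (F (s.drop k) 0 w).map (List.map (fun i => i + k)) := by
  induction s generalizing k w with
  | nil =>
    cases w <;> simp [F]
  | cons a s' ih =>
    cases k with
    | zero => simp
    | succ k' =>
      rw [F_shift1, ih]
      simp only [List.drop_succ_cons, List.map_map]
      refine List.map_congr_left (fun q _ => ?_)
      simp only [Function.comp_def, List.map_map]
      refine List.map_congr_left (fun i _ => ?_)
      simp [Nat.add_assoc]

-- mask building over shifted indices splits off a prefix
theorem foldl_set_shift (q : List Nat) (s : List Char) (pre rest : List Char) :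
    (q.map (fun i => i + pre.length)).foldl (fun m i => m.set i (s.getD i ' ')) (pre ++ rest)
      = pre ++ q.foldl (fun m i => m.set i ((s.drop pre.length).getD i ' ')) rest := by
  induction q generalizing rest with
  | nil => simp
  | cons i q ih =>
    simp only [List.map_cons, List.foldl_cons]
    have hset : (pre ++ rest).set (i + pre.length) (s.getD (i + pre.length) ' ')
        = pre ++ rest.set i ((s.drop pre.length).getD i ' ') := by
      rw [List.set_append, if_neg (by omega)]
      have h1 : i + pre.length - pre.length = i := by omega
      have h2 : s.getD (i + pre.length) ' ' = (s.drop pre.length).getD i ' ' := by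
        simp [List.getD, List.getElem?_drop, Nat.add_comm]
      rw [h1, h2]
    rw [hset, ih]

theorem set_replicate_split (s : List Char) (i : Nat) (hi : i < s.length) :
    (List.replicate s.length '-').set i (s.getD i ' ')
      = (List.replicate i '-' ++ [s.getD i ' ']) ++ List.replicate (s.length - (i + 1)) '-' := by
  have hn : s.length = i + ((s.length - (i + 1)) + 1) := by omega
  conv_lhs => rw [hn, List.replicate_add, List.replicate_succ]
  rw [List.set_append, if_neg (by simp)]
  simp

theorem maskB_cons_shift (s : List Char) (i : Nat) (q : List Nat) (hi : i < s.length) :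
    maskB s (i :: q.map (fun j => j + (i + 1)))
      = (List.replicate i '-' ++ [s.getD i ' ']) ++ maskB (s.drop (i + 1)) q := by
  unfold maskB
  simp only [List.foldl_cons]
  rw [set_replicate_split s i hi]
  have hpre : (List.replicate i '-' ++ [s.getD i ' ']).length = i + 1 := by simp
  have hrest : s.length - (i + 1) = (s.drop (i + 1)).length := by simp
  rw [hrest]
  have := foldl_set_shift q s (List.replicate i '-' ++ [s.getD i ' '])
    (List.replicate (s.drop (i + 1)).length '-')
  rw [hpre] at this
  exact this

-- A equals F composed with mask building
theorem goA_eq_F (w : List Char) (s : List Char) :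
    goA s w = (F s 0 w).map (maskB s) := by
  induction w generalizing s with
  | nil => simp [goA, F, maskB]
  | cons c ws ih =>
    simp only [goA, F, List.map_flatMap]
    refine List.flatMap_congr (fun i hi => ?_)
    have hin : i < s.length := List.mem_range.mp hi
    by_cases hc : c = s.getD i ' '
    · have hc' : 0 ≤ i ∧ s.getD i ' ' = c := ⟨Nat.zero_le i, hc.symm⟩
      rw [if_pos hc, if_pos hc']
      have hmain : (goA (s.drop (i + 1)) ws).map
          (fun r => (List.replicate i '-' ++ [s.getD i ' ']) ++ r)
          = ((F s (i + 1) ws).map (fun q => i :: q)).map (maskB s) := by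
        rw [ih, F_shift s (i + 1) ws]
        simp only [List.map_map]
        refine List.map_congr_left (fun q _ => ?_)
        simp only [Function.comp_def]
        exact (maskB_cons_shift s i q hin).symm
      by_cases hd : s.drop (i + 1) = [] ∧ ws = []
      · obtain ⟨h1, h2⟩ := hd
        subst h2
        rw [if_pos ⟨h1, rfl⟩]
        simpa [goA, h1] using hmain
      · rw [if_neg hd]
        exact hmain
    · have hc' : ¬ (0 ≤ i ∧ s.getD i ' ' = c) := by
        rintro ⟨-, h⟩; exact hc h.symm
      rw [if_neg hc, if_neg hc']
      simp

theorem get_list_of_words_banana_spec : Claim_equal_get_list_of_words_banana := by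
  intro s word _
  unfold Spec_get_list_of_words_banana get_list_of_words_banana get_list_of_words_banana_alt
  rw [goA_eq_F, goB_eq_F, List.map_map]
  rfl
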